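-- pv_equiv track=rewrite | github.com/Semantic-Infrastructure-Lab/reveal | reveal/adapters/ssl/certificate.py | _detect_ssl_issues
-- ===== SOURCE A (Python) =====
-- from typing import Dict, Any, List, Optional, Tuple
--
-- def _detect_ssl_issues(checks: List[Dict[str, Any]]) -> Dict[str, bool]:
--     """Detect SSL issues from check results.
--
--     Args:
--         checks: List of check results
--
--     Returns:
--         Dict of issue flags
--     """
--     return {
--         'expiry': any(c['name'] == 'certificate_expiry' and c['status'] in ('failure', 'warning') for c in checks),
--         'chain': any(c['name'] == 'chain_verification' and c['status'] != 'pass' for c in checks),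
--         'hostname': any(c['name'] == 'hostname_match' and c['status'] == 'failure' for c in checks),
--         'self_signed': any(c['name'] == 'self_signed' and c['value'] == 'Self-signed' for c in checks),
--         'tls': any(c['name'] == 'tls_version' and c['status'] == 'warning' for c in checks)
--     }
-- ===== SOURCE B (Python) =====
-- def _detect_ssl_issues(checks):
--     """Single pass: fold each check into a preinitialized flag dict."""
--     result = {'expiry': False, 'chain': False, 'hostname': False,
--               'self_signed': False, 'tls': False}
--     for c in checks:
--         name = c['name']
--         if name == 'certificate_expiry':
--             result['expiry'] = result['expiry'] or c['status'] in ('failure', 'warning')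
--         elif name == 'chain_verification':
--             result['chain'] = result['chain'] or c['status'] != 'pass'
--         elif name == 'hostname_match':
--             result['hostname'] = result['hostname'] or c['status'] == 'failure'
--         elif name == 'self_signed':
--             result['self_signed'] = result['self_signed'] or c['value'] == 'Self-signed'
--         elif name == 'tls_version':
--             result['tls'] = result['tls'] or c['status'] == 'warning'
--     return result
-- ===== Notes on version B (the rewrite author's own statement) =====
-- stated objective: alternative
-- what changed: A builds the dict from five independent any()-scans over the whole list; B makes one pass over the checks, folding each check into a preinitialized five-flag dict with or-accumulation.
import Mathlib
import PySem

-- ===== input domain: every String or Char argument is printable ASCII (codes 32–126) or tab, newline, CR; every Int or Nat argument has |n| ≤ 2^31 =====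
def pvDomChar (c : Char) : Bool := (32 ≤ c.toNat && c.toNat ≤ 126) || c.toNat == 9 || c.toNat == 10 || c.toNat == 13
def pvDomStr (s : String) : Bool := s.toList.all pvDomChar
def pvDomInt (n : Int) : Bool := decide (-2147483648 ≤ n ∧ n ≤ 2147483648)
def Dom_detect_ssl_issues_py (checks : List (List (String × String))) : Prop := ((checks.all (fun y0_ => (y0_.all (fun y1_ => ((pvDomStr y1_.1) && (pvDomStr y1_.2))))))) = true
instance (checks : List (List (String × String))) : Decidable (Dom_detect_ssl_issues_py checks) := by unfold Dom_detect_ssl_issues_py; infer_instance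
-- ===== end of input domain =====

-- B replaces A's five independent any()-scans of the list by one pass folding each
-- check into a preinitialized five-flag dict (alternative decomposition, same cost class).

-- shared helper: c[k] where the key is present (Pre_); default "" marks the excluded raise case
def pvKeyGet (c : List (String × String)) (k : String) : String :=
  PySem.Dict.getD (PySem.Dict.mk c) k ""

-- ===== PORT A =====
def detect_ssl_issues_py (checks : List (List (String × String))) : List (String × Bool) :=
  [ ("expiry", checks.any (fun c => pvKeyGet c "name" == "certificate_expiry" &&
        (pvKeyGet c "status" == "failure" || pvKeyGet c "status" == "warning"))),
    ("chain", checks.any (fun c => pvKeyGet c "name" == "chain_verification" &&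
        pvKeyGet c "status" != "pass")),
    ("hostname", checks.any (fun c => pvKeyGet c "name" == "hostname_match" &&
        pvKeyGet c "status" == "failure")),
    ("self_signed", checks.any (fun c => pvKeyGet c "name" == "self_signed" &&
        pvKeyGet c "value" == "Self-signed")),
    ("tls", checks.any (fun c => pvKeyGet c "name" == "tls_version" &&
        pvKeyGet c "status" == "warning")) ]

-- ===== PORT B =====
def pvStepB (r : PySem.Dict String Bool) (c : List (String × String)) : PySem.Dict String Bool :=
  let name := pvKeyGet c "name"
  if name == "certificate_expiry" then
    r.insert "expiry" (r.getD "expiry" false ||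
      (pvKeyGet c "status" == "failure" || pvKeyGet c "status" == "warning"))
  else if name == "chain_verification" then
    r.insert "chain" (r.getD "chain" false || pvKeyGet c "status" != "pass")
  else if name == "hostname_match" then
    r.insert "hostname" (r.getD "hostname" false || pvKeyGet c "status" == "failure")
  else if name == "self_signed" then
    r.insert "self_signed" (r.getD "self_signed" false || pvKeyGet c "value" == "Self-signed")
  else if name == "tls_version" then
    r.insert "tls" (r.getD "tls" false || pvKeyGet c "status" == "warning")
  else r

def detect_ssl_issues_py_alt (checks : List (List (String × String))) : List (String × Bool) :=
  (checks.foldl pvStepB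
    (PySem.Dict.ofList [("expiry", false), ("chain", false), ("hostname", false),
                        ("self_signed", false), ("tls", false)])).items

-- ===== PRECONDITION & SPEC =====
-- Pre_ excludes the inputs on which a check lacks the key its branch reads (KeyError in
-- A and/or B) — including the rare inputs where A still returns only because every any()
-- short-circuits before reaching the defective check (on some of those B raises, on
-- others both return the same value; Pre_ is slightly narrower than the raising set).
def Pre_detect_ssl_issues_py (checks : List (List (String × String))) : Prop :=
  (checks.all (fun c =>
    (PySem.Dict.mk c).contains "name" &&
    (let n := pvKeyGet c "name"
     if n == "certificate_expiry" || n == "chain_verification" ||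
        n == "hostname_match" || n == "tls_version" then (PySem.Dict.mk c).contains "status"
     else if n == "self_signed" then (PySem.Dict.mk c).contains "value"
     else true))) = true
instance (checks : List (List (String × String))) : Decidable (Pre_detect_ssl_issues_py checks) := by
  unfold Pre_detect_ssl_issues_py; infer_instance

def pvWitness_detect_ssl_issues_py : (List (List (String × String))) :=
  [[("name", "certificate_expiry"), ("status", "failure")], [("name", "tls_version"), ("status", "pass")]]

def Spec_detect_ssl_issues_py (checks : List (List (String × String))) (out : List (String × Bool)) : Prop := out = detect_ssl_issues_py_alt checks
instance (checks : List (List (String × String))) (out : List (String × Bool)) : Decidable (Spec_detect_ssl_issues_py checks out) := by unfold Spec_detect_ssl_issues_py; infer_instance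

-- ===== CLAIM (what is proved, stated in full; the proofs are below) =====
def Claim_equal_detect_ssl_issues_py : Prop := ∀ (checks : List (List (String × String))), Dom_detect_ssl_issues_py checks → Pre_detect_ssl_issues_py checks → Spec_detect_ssl_issues_py checks (detect_ssl_issues_py checks)

-- ===== LEMMAS AND PROOFS =====

-- loop invariant: folding over any tail from any five-flag state or-accumulates A's anys
lemma pvFoldB_items (checks : List (List (String × String))) (e ch h s t : Bool) :
    (checks.foldl pvStepB (PySem.Dict.mk
        [("expiry", e), ("chain", ch), ("hostname", h), ("self_signed", s), ("tls", t)])).items =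
    [ ("expiry", e || checks.any (fun c => pvKeyGet c "name" == "certificate_expiry" &&
          (pvKeyGet c "status" == "failure" || pvKeyGet c "status" == "warning"))),
      ("chain", ch || checks.any (fun c => pvKeyGet c "name" == "chain_verification" &&
          pvKeyGet c "status" != "pass")),
      ("hostname", h || checks.any (fun c => pvKeyGet c "name" == "hostname_match" &&
          pvKeyGet c "status" == "failure")),
      ("self_signed", s || checks.any (fun c => pvKeyGet c "name" == "self_signed" &&
          pvKeyGet c "value" == "Self-signed")),
      ("tls", t || checks.any (fun c => pvKeyGet c "name" == "tls_version" &&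
          pvKeyGet c "status" == "warning")) ] := by
  induction checks generalizing e ch h s t with
  | nil => simp
  | cons c cs ih =>
    simp only [List.foldl_cons, List.any_cons]
    by_cases h1 : pvKeyGet c "name" = "certificate_expiry"
    · have hstep : pvStepB (PySem.Dict.mk [("expiry", e), ("chain", ch), ("hostname", h), ("self_signed", s), ("tls", t)]) c = PySem.Dict.mk [("expiry", e || (pvKeyGet c "status" == "failure" || pvKeyGet c "status" == "warning")), ("chain", ch), ("hostname", h), ("self_signed", s), ("tls", t)] := by
        simp [pvStepB, beq_iff_eq, h1, PySem.Dict.insert, PySem.Dict.getD, PySem.Dict.get?]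
      rw [hstep, ih]
      simp [h1, Bool.or_assoc]
    by_cases h2 : pvKeyGet c "name" = "chain_verification"
    · have hstep : pvStepB (PySem.Dict.mk [("expiry", e), ("chain", ch), ("hostname", h), ("self_signed", s), ("tls", t)]) c = PySem.Dict.mk [("expiry", e), ("chain", ch || pvKeyGet c "status" != "pass"), ("hostname", h), ("self_signed", s), ("tls", t)] := by
        simp [pvStepB, beq_iff_eq, h2, PySem.Dict.insert, PySem.Dict.getD, PySem.Dict.get?]
      rw [hstep, ih]
      simp [h2, Bool.or_assoc]
    by_cases h3 : pvKeyGet c "name" = "hostname_match"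
    · have hstep : pvStepB (PySem.Dict.mk [("expiry", e), ("chain", ch), ("hostname", h), ("self_signed", s), ("tls", t)]) c = PySem.Dict.mk [("expiry", e), ("chain", ch), ("hostname", h || pvKeyGet c "status" == "failure"), ("self_signed", s), ("tls", t)] := by
        simp [pvStepB, beq_iff_eq, h3, PySem.Dict.insert, PySem.Dict.getD, PySem.Dict.get?]
      rw [hstep, ih]
      simp [h3, Bool.or_assoc]
    by_cases h4 : pvKeyGet c "name" = "self_signed"
    · have hstep : pvStepB (PySem.Dict.mk [("expiry", e), ("chain", ch), ("hostname", h), ("self_signed", s), ("tls", t)]) c = PySem.Dict.mk [("expiry", e), ("chain", ch), ("hostname", h), ("self_signed", s || pvKeyGet c "value" == "Self-signed"), ("tls", t)] := by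
        simp [pvStepB, beq_iff_eq, h4, PySem.Dict.insert, PySem.Dict.getD, PySem.Dict.get?]
      rw [hstep, ih]
      simp [h4, Bool.or_assoc]
    by_cases h5 : pvKeyGet c "name" = "tls_version"
    · have hstep : pvStepB (PySem.Dict.mk [("expiry", e), ("chain", ch), ("hostname", h), ("self_signed", s), ("tls", t)]) c = PySem.Dict.mk [("expiry", e), ("chain", ch), ("hostname", h), ("self_signed", s), ("tls", t || pvKeyGet c "status" == "warning")] := by
        simp [pvStepB, beq_iff_eq, h5, PySem.Dict.insert, PySem.Dict.getD, PySem.Dict.get?]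
      rw [hstep, ih]
      simp [h5, Bool.or_assoc]
    have hstep : pvStepB (PySem.Dict.mk [("expiry", e), ("chain", ch), ("hostname", h), ("self_signed", s), ("tls", t)]) c = PySem.Dict.mk [("expiry", e), ("chain", ch), ("hostname", h), ("self_signed", s), ("tls", t)] := by
      simp [pvStepB, beq_iff_eq, h1, h2, h3, h4, h5]
    have e1 : (pvKeyGet c "name" == "certificate_expiry") = false := beq_eq_false_iff_ne.mpr h1
    have e2 : (pvKeyGet c "name" == "chain_verification") = false := beq_eq_false_iff_ne.mpr h2
    have e3 : (pvKeyGet c "name" == "hostname_match") = false := beq_eq_false_iff_ne.mpr h3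
    have e4 : (pvKeyGet c "name" == "self_signed") = false := beq_eq_false_iff_ne.mpr h4
    have e5 : (pvKeyGet c "name" == "tls_version") = false := beq_eq_false_iff_ne.mpr h5
    rw [hstep, ih]
    simp [e1, e2, e3, e4, e5]

-- ===== VERDICT (by name: the statement is the Claim_ definition above) =====
theorem detect_ssl_issues_py_spec : Claim_equal_detect_ssl_issues_py := by
  intro checks _ _
  unfold Spec_detect_ssl_issues_py detect_ssl_issues_py detect_ssl_issues_py_alt
  rw [show (PySem.Dict.ofList [("expiry", false), ("chain", false), ("hostname", false),
        ("self_signed", false), ("tls", false)] : PySem.Dict String Bool) = PySem.Dict.mk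
        [("expiry", false), ("chain", false), ("hostname", false),
        ("self_signed", false), ("tls", false)] from rfl]
  rw [pvFoldB_items]
  simp
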